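-- pv_equiv track=rewrite | github.com/ZJU-DAILY/TAPE-demo | back-end/COCO/utils.py | optimize_neighbor_search
-- ===== SOURCE A (Python) =====
-- def optimize_neighbor_search(temporal_graph, t_start, t_end, center_vertices):
--     neighbor_k_hop = set()
--     visited = set()
--     for center_vertex in center_vertices:
--         queue = [(center_vertex, 0)]
--         visited = {center_vertex}
--         while queue:
--             curr_vertex, curr_hop = queue.pop(0)
--             neighbor_k_hop.add(curr_vertex)
--
--             if curr_hop < 5 and curr_vertex in temporal_graph:
--                 for t, neighbors in temporal_graph[curr_vertex].items():
--                     if t_start <= t <= t_end: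
--                         for neighbor in neighbors:
--                             if neighbor not in visited:
--                                 visited.add(neighbor)
--                                 queue.append((neighbor, curr_hop + 1))
--
--     return neighbor_k_hop
-- ===== SOURCE B (Python) =====
-- def optimize_neighbor_search(temporal_graph, t_start, t_end, center_vertices):
--     # Stage 1: collapse the temporal structure once into a static, time-window-filtered
--     # adjacency index, so no per-visit window filtering remains.
--     adj = {v: [nb for t, nbs in buckets.items() if t_start <= t <= t_end for nb in nbs]
--            for v, buckets in temporal_graph.items()}
--     result = set()
--     # Stage 2: per center, at most 5 rounds of whole-set closure expansion R := R | N(R)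
--     # (no queue, no frontier/visited bookkeeping; stop when the set stops growing).
--     for center in center_vertices:
--         reach = {center}
--         for _ in range(5):
--             prev = len(reach)
--             for v in list(reach):
--                 for nb in adj.get(v, []):
--                     reach.add(nb)
--             if len(reach) == prev:
--                 break
--         result |= reach
--     return result
-- ===== Notes on version B (the rewrite author's own statement) =====
-- stated objective: alternative
-- what changed: B first collapses the temporal graph once into a static time-window-filtered adjacency index (the per-visit time-bucket scan disappears), then per center computes the 5-hop set by at most 5 rounds of whole-set closure expansion R := R | N(R) over a snapshot of R with a cardinality-based fixpoint stop, instead of A's (vertex, hop)-tagged BFS queue with visited-set pruning.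
import Mathlib
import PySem

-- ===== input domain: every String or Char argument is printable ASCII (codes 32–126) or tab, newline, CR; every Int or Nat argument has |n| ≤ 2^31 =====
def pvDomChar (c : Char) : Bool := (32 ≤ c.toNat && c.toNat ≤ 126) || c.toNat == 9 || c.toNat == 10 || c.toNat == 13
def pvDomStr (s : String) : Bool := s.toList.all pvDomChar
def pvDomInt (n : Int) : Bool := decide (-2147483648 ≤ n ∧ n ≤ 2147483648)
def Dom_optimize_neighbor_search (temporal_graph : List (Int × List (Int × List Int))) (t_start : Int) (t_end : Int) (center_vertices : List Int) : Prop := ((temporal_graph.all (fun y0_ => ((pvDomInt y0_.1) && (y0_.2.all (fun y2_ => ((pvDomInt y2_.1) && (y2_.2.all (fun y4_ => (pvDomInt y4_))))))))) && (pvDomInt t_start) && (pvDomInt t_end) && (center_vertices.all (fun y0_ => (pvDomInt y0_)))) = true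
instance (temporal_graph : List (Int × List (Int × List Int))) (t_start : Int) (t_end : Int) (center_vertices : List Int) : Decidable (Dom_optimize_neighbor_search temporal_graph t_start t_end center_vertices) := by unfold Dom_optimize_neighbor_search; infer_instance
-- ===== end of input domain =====

-- B precomputes a time-window-filtered static adjacency index once and then, per center, runs
-- at most 5 rounds of whole-set closure expansion R := R | N(R) (cardinality fixpoint stop),
-- instead of A's (vertex, hop)-tagged BFS queue with visited pruning; same returned set.

-- ===== PORT A =====
-- A walks a (vertex, hop) FIFO queue per center; fuel bounds the pops (proved sufficient below).
-- `if neighbor not in visited: visited.add(neighbor); queue.append((neighbor, curr_hop+1))`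
def pvA_visit (curr_hop : Int) (st2 : PySem.Set Int × List (Int × Int)) (nb : Int) :
    PySem.Set Int × List (Int × Int) :=
  if PySem.Set.contains st2.1 nb then st2
  else (PySem.Set.add st2.1 nb, st2.2 ++ [(nb, curr_hop + 1)])

-- `if t_start <= t <= t_end: for neighbor in neighbors: …`
def pvA_window (t_start t_end curr_hop : Int) (st : PySem.Set Int × List (Int × Int))
    (tn : Int × List Int) : PySem.Set Int × List (Int × Int) :=
  if t_start ≤ tn.1 ∧ tn.1 ≤ t_end then tn.2.foldl (pvA_visit curr_hop) st else st

-- `for t, neighbors in temporal_graph[curr_vertex].items(): …`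
def pvA_collect (t_start t_end : Int) (items : List (Int × List Int))
    (st0 : PySem.Set Int × List (Int × Int)) (curr_hop : Int) :
    PySem.Set Int × List (Int × Int) :=
  items.foldl (pvA_window t_start t_end curr_hop) st0

-- `while queue: curr_vertex, curr_hop = queue.pop(0); neighbor_k_hop.add(curr_vertex); …`
def pvA_loop (g : PySem.Dict Int (List (Int × List Int))) (t_start t_end : Int) :
    Nat → List (Int × Int) → PySem.Set Int → PySem.Set Int → PySem.Set Int
  | _, [], _, acc => acc
  | 0, _ :: _, _, acc => acc
  | fuel+1, (curr_vertex, curr_hop) :: rest, visited, acc =>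
      let acc' := PySem.Set.add acc curr_vertex
      if curr_hop < 5 ∧ g.contains curr_vertex then
        let st := pvA_collect t_start t_end ((g.get? curr_vertex).getD []) (visited, rest) curr_hop
        pvA_loop g t_start t_end fuel st.2 st.1 acc'
      else
        pvA_loop g t_start t_end fuel rest visited acc'

def optimize_neighbor_search (temporal_graph : List (Int × List (Int × List Int))) (t_start : Int) (t_end : Int) (center_vertices : List Int) : List Int :=
  let g := PySem.Dict.mk temporal_graph
  let fuel := (temporal_graph.map (fun p => (p.2.map (fun q => q.2.length)).sum)).sum + 1
  center_vertices.foldl (fun neighbor_k_hop center_vertex =>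
    pvA_loop g t_start t_end fuel [(center_vertex, 0)]
      (PySem.Set.ofList [center_vertex]) neighbor_k_hop) PySem.Set.empty

-- ===== PORT B =====
-- `[nb for t, nbs in buckets.items() if t_start <= t <= t_end for nb in nbs]`
def pvB_merge (t_start t_end : Int) (buckets : List (Int × List Int)) : List Int :=
  buckets.flatMap (fun tn => if t_start ≤ tn.1 ∧ tn.1 ≤ t_end then tn.2 else [])

-- `adj = {v: [… ] for v, buckets in temporal_graph.items()}`
def pvB_adj (t_start t_end : Int) (temporal_graph : List (Int × List (Int × List Int))) :
    PySem.Dict Int (List Int) :=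
  PySem.Dict.mk (((PySem.Dict.mk temporal_graph).items).map
    (fun p => (p.1, pvB_merge t_start t_end p.2)))

-- `for nb in adj.get(v, []): reach.add(nb)`
def pvB_scan (adj : PySem.Dict Int (List Int)) (reach : PySem.Set Int) (v : Int) : PySem.Set Int :=
  ((adj.get? v).getD []).foldl PySem.Set.add reach

-- one round: `for v in list(reach): …` — the snapshot is the set's current element list
def pvB_round (adj : PySem.Dict Int (List Int)) (reach : PySem.Set Int) : PySem.Set Int :=
  reach.foldl (pvB_scan adj) reach

-- `for _ in range(5): prev = len(reach); …; if len(reach) == prev: break`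
def pvB_rounds (adj : PySem.Dict Int (List Int)) : Nat → PySem.Set Int → PySem.Set Int
  | 0, reach => reach
  | n+1, reach =>
      let prev := PySem.Set.len reach
      let reach' := pvB_round adj reach
      if PySem.Set.len reach' = prev then reach' else pvB_rounds adj n reach'

def optimize_neighbor_search_alt (temporal_graph : List (Int × List (Int × List Int))) (t_start : Int) (t_end : Int) (center_vertices : List Int) : List Int :=
  let adj := pvB_adj t_start t_end temporal_graph
  center_vertices.foldl (fun result center =>
    PySem.Set.union result (pvB_rounds adj 5 (PySem.Set.ofList [center]))) PySem.Set.empty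

-- ===== PRECONDITION & SPEC =====
def Spec_optimize_neighbor_search (temporal_graph : List (Int × List (Int × List Int))) (t_start : Int) (t_end : Int) (center_vertices : List Int) (out : List Int) : Prop := out = optimize_neighbor_search_alt temporal_graph t_start t_end center_vertices
instance (temporal_graph : List (Int × List (Int × List Int))) (t_start : Int) (t_end : Int) (center_vertices : List Int) (out : List Int) : Decidable (Spec_optimize_neighbor_search temporal_graph t_start t_end center_vertices out) := by unfold Spec_optimize_neighbor_search; infer_instance

-- ===== CLAIM (what is proved, stated in full; the proofs are below) =====
def Claim_equal_optimize_neighbor_search : Prop := ∀ (temporal_graph : List (Int × List (Int × List Int))) (t_start : Int) (t_end : Int) (center_vertices : List Int), Dom_optimize_neighbor_search temporal_graph t_start t_end center_vertices → Spec_optimize_neighbor_search temporal_graph t_start t_end center_vertices (optimize_neighbor_search temporal_graph t_start t_end center_vertices)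

-- ===== LEMMAS AND PROOFS =====

-- canonical collectors (proof-side): the same collection, returning (visited', newly-discovered)
def pvColN (nbrs : List Int) (vis : PySem.Set Int) : PySem.Set Int × List Int :=
  match nbrs with
  | [] => (vis, [])
  | nb :: rest =>
      if PySem.Set.contains vis nb then pvColN rest vis
      else
        let r := pvColN rest (PySem.Set.add vis nb)
        (r.1, nb :: r.2)

def pvColI (ts te : Int) (items : List (Int × List Int)) (vis : PySem.Set Int) : PySem.Set Int × List Int :=
  match items with
  | [] => (vis, [])
  | tn :: rest =>
      if ts ≤ tn.1 ∧ tn.1 ≤ te then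
        let r1 := pvColN tn.2 vis
        let r2 := pvColI ts te rest r1.1
        (r2.1, r1.2 ++ r2.2)
      else pvColI ts te rest vis

def pvRoundC (g : PySem.Dict Int (List (Int × List Int))) (ts te : Int) (f : List Int) (vis : PySem.Set Int) : PySem.Set Int × List Int :=
  match f with
  | [] => (vis, [])
  | v :: rest =>
      let r1 := pvColI ts te ((g.get? v).getD []) vis
      let r2 := pvRoundC g ts te rest r1.1
      (r2.1, r1.2 ++ r2.2)

def pvIter (g : PySem.Dict Int (List (Int × List Int))) (ts te : Int) : Nat → PySem.Set Int → List Int → PySem.Set Int × List Int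
  | 0, vis, f => (vis, f)
  | n+1, vis, f => pvIter g ts te n (pvRoundC g ts te f vis).1 (pvRoundC g ts te f vis).2

def pvNews (g : PySem.Dict Int (List (Int × List Int))) (ts te : Int) : Nat → PySem.Set Int → List Int → List Int
  | 0, _, _ => []
  | n+1, vis, f => (pvRoundC g ts te f vis).2 ++ pvNews g ts te n (pvRoundC g ts te f vis).1 (pvRoundC g ts te f vis).2

def pvTrace (g : PySem.Dict Int (List (Int × List Int))) (ts te : Int) : Nat → PySem.Set Int → List Int → List Int
  | 0, _, f => f
  | n+1, vis, f => f ++ pvTrace g ts te n (pvRoundC g ts te f vis).1 (pvRoundC g ts te f vis).2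

def pvPops (g : PySem.Dict Int (List (Int × List Int))) (ts te : Int) : Nat → PySem.Set Int → List Int → Nat
  | 0, _, f => f.length
  | n+1, vis, f => f.length + pvPops g ts te n (pvRoundC g ts te f vis).1 (pvRoundC g ts te f vis).2

def pvAllN (tg : List (Int × List (Int × List Int))) : List Int :=
  tg.flatMap (fun p => p.2.flatMap (fun q => q.2))

-- A's inner neighbour fold, queue-shifted to the canonical collector
lemma pvA_nbrs (nbrs : List Int) (vis : PySem.Set Int) (q : List (Int × Int)) (h : Int) :
    nbrs.foldl (pvA_visit h) (vis, q)
    = ((pvColN nbrs vis).1, q ++ (pvColN nbrs vis).2.map (fun nb => (nb, h + 1))) := by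
  induction nbrs generalizing vis q with
  | nil => simp [pvColN]
  | cons nb rest ih =>
      rw [List.foldl_cons]
      simp only [pvColN, pvA_visit]
      cases hc : PySem.Set.contains vis nb
      · rw [if_neg (by simp), if_neg (by simp), ih]
        simp
      · rw [if_pos (by simp), if_pos (by simp), ih]

lemma pvA_items (ts te : Int) (items : List (Int × List Int)) (vis : PySem.Set Int) (q : List (Int × Int)) (h : Int) :
    pvA_collect ts te items (vis, q) h
    = ((pvColI ts te items vis).1, q ++ (pvColI ts te items vis).2.map (fun nb => (nb, h + 1))) := by
  induction items generalizing vis q with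
  | nil => simp [pvA_collect, pvColI]
  | cons tn rest ih =>
      simp only [pvA_collect, List.foldl_cons] at ih ⊢
      simp only [pvColI, pvA_window]
      by_cases hw : ts ≤ tn.1 ∧ tn.1 ≤ te
      · rw [if_pos hw, if_pos hw, pvA_nbrs, ih]
        simp [List.append_assoc]
      · rw [if_neg hw, if_neg hw, ih]

-- B's snapshot scan of one vertex, related to the canonical collector:
-- folding Set.add over a plain list is the collector's visited component
lemma pvB_add_fold (l : List Int) (r : PySem.Set Int) :
    l.foldl PySem.Set.add r = (pvColN l r).1 := by
  induction l generalizing r with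
  | nil => simp [pvColN]
  | cons nb rest ih =>
      rw [List.foldl_cons]
      simp only [pvColN]
      cases hc : PySem.Set.contains r nb
      · rw [if_neg (by simp)]
        exact ih _
      · rw [if_pos (by simp), PySem.Set.add_of_mem (by simpa using hc)]
        exact ih _

-- collecting a concatenation = collecting the parts in sequence
lemma pvColN_append (l1 l2 : List Int) (vis : PySem.Set Int) :
    pvColN (l1 ++ l2) vis
    = ((pvColN l2 (pvColN l1 vis).1).1, (pvColN l1 vis).2 ++ (pvColN l2 (pvColN l1 vis).1).2) := by
  induction l1 generalizing vis with
  | nil => simp [pvColN]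
  | cons nb rest ih =>
      simp only [List.cons_append, pvColN]
      cases hc : PySem.Set.contains vis nb
      · rw [if_neg (by simp), if_neg (by simp), ih]
        simp
      · rw [if_pos (by simp), if_pos (by simp), ih]

-- collecting the merged (window-filtered) list = collecting the buckets with the window test
lemma pvColN_merge (ts te : Int) (items : List (Int × List Int)) (vis : PySem.Set Int) :
    pvColN (pvB_merge ts te items) vis = pvColI ts te items vis := by
  induction items generalizing vis with
  | nil => simp [pvB_merge, pvColN, pvColI]
  | cons tn rest ih =>
      simp only [pvB_merge, List.flatMap_cons] at ih ⊢
      by_cases hw : ts ≤ tn.1 ∧ tn.1 ≤ te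
      · rw [if_pos hw, pvColN_append, ih]
        simp only [pvColI, if_pos hw]
      · rw [if_neg hw, List.nil_append, ih]
        simp only [pvColI, if_neg hw]

-- the precomputed index looks up the merged window-filtered bucket lists
lemma pvB_adj_mk (ts te : Int) (l : List (Int × List (Int × List Int))) (v : Int) :
    (PySem.Dict.mk (l.map (fun p => (p.1, pvB_merge ts te p.2)))).get? v
    = ((PySem.Dict.mk l).get? v).map (pvB_merge ts te) := by
  induction l with
  | nil => rfl
  | cons p rest ih =>
      rw [List.map_cons]
      rw [PySem.Dict.get?_mk_cons, PySem.Dict.get?_mk_cons]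
      by_cases he : p.1 == v
      · simp [he]
      · simp only [he, Bool.false_eq_true, if_false]
        exact ih

lemma pvB_adj_get (ts te : Int) (tg : List (Int × List (Int × List Int))) (v : Int) :
    ((pvB_adj ts te tg).get? v).getD []
    = pvB_merge ts te (((PySem.Dict.mk tg).get? v).getD []) := by
  have hmk : PySem.Dict.mk ((PySem.Dict.mk tg).items) = PySem.Dict.mk tg :=
    PySem.Dict.ext_iff.mpr rfl
  rw [pvB_adj, pvB_adj_mk, hmk]
  cases (PySem.Dict.mk tg).get? v with
  | none => simp [pvB_merge]
  | some items => simp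

-- scanning one vertex of the snapshot = one canonical collection step
lemma pvB_scan_eq (ts te : Int) (tg : List (Int × List (Int × List Int))) (r : PySem.Set Int) (v : Int) :
    pvB_scan (pvB_adj ts te tg) r v
    = (pvColI ts te (((PySem.Dict.mk tg).get? v).getD []) r).1 := by
  rw [pvB_scan, pvB_adj_get, pvB_add_fold, pvColN_merge]

-- membership facts about Set.add used by the monotonicity lemmas
lemma pvMemAdd_of_mem (s : PySem.Set Int) (x y : Int) (h : y ∈ s) : y ∈ PySem.Set.add s x := by
  simp [PySem.Set.add_eq_ite]; split_ifs <;> simp [h]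

lemma pvMemAdd_self (s : PySem.Set Int) (x : Int) : x ∈ PySem.Set.add s x := by
  simp [PySem.Set.add_eq_ite]; split_ifs with h <;> simp [h]

-- membership monotonicity of the collectors
lemma pvColN_mono (l : List Int) (vis : PySem.Set Int) (x : Int) (hx : x ∈ vis) :
    x ∈ (pvColN l vis).1 := by
  induction l generalizing vis with
  | nil => simpa [pvColN]
  | cons nb rest ih =>
      simp only [pvColN]
      cases hc : PySem.Set.contains vis nb
      · rw [if_neg (by simp)]
        exact ih _ (pvMemAdd_of_mem _ _ _ hx)
      · rw [if_pos (by simp)]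
        exact ih _ hx

lemma pvColN_self (l : List Int) (vis : PySem.Set Int) (x : Int) (hx : x ∈ l) :
    x ∈ (pvColN l vis).1 := by
  induction l generalizing vis with
  | nil => simp at hx
  | cons nb rest ih =>
      simp only [pvColN]
      rcases List.mem_cons.1 hx with rfl | hx
      · cases hc : PySem.Set.contains vis x
        · rw [if_neg (by simp)]
          exact pvColN_mono _ _ _ (pvMemAdd_self _ _)
        · rw [if_pos (by simp)]
          exact pvColN_mono _ _ _ (by simpa using hc)
      · cases hc : PySem.Set.contains vis nb
        · rw [if_neg (by simp)]; exact ih _ hx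
        · rw [if_pos (by simp)]; exact ih _ hx

lemma pvColI_mono (ts te : Int) (items : List (Int × List Int)) (vis : PySem.Set Int) (x : Int)
    (hx : x ∈ vis) : x ∈ (pvColI ts te items vis).1 := by
  rw [← pvColN_merge]
  exact pvColN_mono _ _ _ hx

lemma pvRoundC_mono (g : PySem.Dict Int (List (Int × List Int))) (ts te : Int) (f : List Int)
    (vis : PySem.Set Int) (x : Int) (hx : x ∈ vis) : x ∈ (pvRoundC g ts te f vis).1 := by
  induction f generalizing vis with
  | nil => simpa [pvRoundC]
  | cons v rest ih =>
      simp only [pvRoundC]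
      exact ih _ (pvColI_mono _ _ _ _ _ hx)

-- every window-filtered neighbour of a frontier vertex lands in the round's visited set
lemma pvRoundC_self (g : PySem.Dict Int (List (Int × List Int))) (ts te : Int) (f : List Int)
    (vis : PySem.Set Int) (v : Int) (hv : v ∈ f) (x : Int)
    (hx : x ∈ pvB_merge ts te ((g.get? v).getD [])) : x ∈ (pvRoundC g ts te f vis).1 := by
  induction f generalizing vis with
  | nil => simp at hv
  | cons w rest ih =>
      simp only [pvRoundC]
      rcases List.mem_cons.1 hv with rfl | hv
      · exact pvRoundC_mono _ _ _ _ _ _ (by rw [← pvColN_merge]; exact pvColN_self _ _ _ hx)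
      · exact ih _ hv

-- growth: the collectors only append the newly discovered elements to visited
lemma pvColN_grow (nbrs : List Int) (vis : PySem.Set Int) (hnd : vis.Nodup) :
    (pvColN nbrs vis).1 = vis ++ (pvColN nbrs vis).2 ∧ (pvColN nbrs vis).1.Nodup := by
  induction nbrs generalizing vis with
  | nil => simp [pvColN, hnd]
  | cons nb rest ih =>
      simp only [pvColN]
      cases hc : PySem.Set.contains vis nb
      · have hmem : nb ∉ vis := by simpa using hc
        have hadd : PySem.Set.add vis nb = vis ++ [nb] := PySem.Set.add_of_not_mem hmem
        have hnd' : (PySem.Set.add vis nb).Nodup := PySem.Set.nodup_add _ _ hnd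
        obtain ⟨h1, h2⟩ := ih (PySem.Set.add vis nb) hnd'
        rw [if_neg (by simp)]
        refine ⟨?_, h2⟩
        rw [h1, hadd]
        simp
      · rw [if_pos (by simp)]
        exact ih vis hnd

lemma pvColI_grow (ts te : Int) (items : List (Int × List Int)) (vis : PySem.Set Int) (hnd : vis.Nodup) :
    (pvColI ts te items vis).1 = vis ++ (pvColI ts te items vis).2 ∧ (pvColI ts te items vis).1.Nodup := by
  induction items generalizing vis with
  | nil => simp [pvColI, hnd]
  | cons tn rest ih =>
      simp only [pvColI]
      by_cases hw : ts ≤ tn.1 ∧ tn.1 ≤ te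
      · obtain ⟨h1, h2⟩ := pvColN_grow tn.2 vis hnd
        obtain ⟨h3, h4⟩ := ih (pvColN tn.2 vis).1 h2
        rw [if_pos hw]
        refine ⟨?_, h4⟩
        rw [h3, h1, List.append_assoc]
      · rw [if_neg hw]
        exact ih vis hnd

lemma pvRoundC_grow (g : PySem.Dict Int (List (Int × List Int))) (ts te : Int) (f : List Int) (vis : PySem.Set Int) (hnd : vis.Nodup) :
    (pvRoundC g ts te f vis).1 = vis ++ (pvRoundC g ts te f vis).2 ∧ (pvRoundC g ts te f vis).1.Nodup := by
  induction f generalizing vis with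
  | nil => simp [pvRoundC, hnd]
  | cons v rest ih =>
      simp only [pvRoundC]
      obtain ⟨h1, h2⟩ := pvColI_grow ts te ((g.get? v).getD []) vis hnd
      obtain ⟨h3, h4⟩ := ih (pvColI ts te ((g.get? v).getD []) vis).1 h2
      refine ⟨?_, h4⟩
      rw [h3, h1, List.append_assoc]

-- membership: newly discovered vertices occur in the scanned adjacency lists
lemma pvColN_mem (nbrs : List Int) (vis : PySem.Set Int) (x : Int)
    (hx : x ∈ (pvColN nbrs vis).2) : x ∈ nbrs := by
  induction nbrs generalizing vis with
  | nil => simp [pvColN] at hx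
  | cons nb rest ih =>
      simp only [pvColN] at hx
      cases hc : PySem.Set.contains vis nb
      · rw [if_neg (by simpa using hc)] at hx
        rcases List.mem_cons.1 hx with hx | hx
        · simp [hx]
        · exact List.mem_cons_of_mem _ (ih _ hx)
      · rw [if_pos hc] at hx
        exact List.mem_cons_of_mem _ (ih vis hx)

lemma pvColI_mem (ts te : Int) (items : List (Int × List Int)) (vis : PySem.Set Int) (x : Int)
    (hx : x ∈ (pvColI ts te items vis).2) : ∃ tn ∈ items, x ∈ tn.2 := by
  induction items generalizing vis with
  | nil => simp [pvColI] at hx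
  | cons tn rest ih =>
      simp only [pvColI] at hx
      by_cases hw : ts ≤ tn.1 ∧ tn.1 ≤ te
      · rw [if_pos hw] at hx
        rcases List.mem_append.1 hx with hx | hx
        · exact ⟨tn, by simp, pvColN_mem _ _ _ hx⟩
        · obtain ⟨tn', h1, h2⟩ := ih _ hx
          exact ⟨tn', List.mem_cons_of_mem _ h1, h2⟩
      · rw [if_neg hw] at hx
        obtain ⟨tn', h1, h2⟩ := ih _ hx
        exact ⟨tn', List.mem_cons_of_mem _ h1, h2⟩

lemma pvRoundC_mem (tg : List (Int × List (Int × List Int))) (ts te : Int) (f : List Int) (vis : PySem.Set Int) (x : Int)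
    (hx : x ∈ (pvRoundC (PySem.Dict.mk tg) ts te f vis).2) : x ∈ pvAllN tg := by
  induction f generalizing vis with
  | nil => simp [pvRoundC] at hx
  | cons v rest ih =>
      simp only [pvRoundC] at hx
      rcases List.mem_append.1 hx with hx | hx
      · cases hg : (PySem.Dict.mk tg).get? v with
        | none => simp [hg, pvColI] at hx
        | some items =>
            obtain ⟨tn, h1, h2⟩ := pvColI_mem ts te items vis x (by simpa [hg] using hx)
            have hmem : (v, items) ∈ tg := PySem.Dict.mem_items_of_get?_eq_some _ hg
            simp only [pvAllN, List.mem_flatMap]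
            exact ⟨(v, items), hmem, tn, h1, h2⟩
      · exact ih _ hx

-- level advance: with hop < 5, A consumes one whole queue level as one canonical round
lemma pvA_level (g : PySem.Dict Int (List (Int × List Int))) (ts te : Int)
    (f : List Int) (q2 : List Int) (vis acc : PySem.Set Int) (m : Nat) (h : Int) (hh : h < 5) :
    pvA_loop g ts te (f.length + m) (f.map (fun v => (v, h)) ++ q2.map (fun v => (v, h + 1))) vis acc
    = pvA_loop g ts te m ((q2 ++ (pvRoundC g ts te f vis).2).map (fun v => (v, h + 1)))
        (pvRoundC g ts te f vis).1 (f.foldl PySem.Set.add acc) := by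
  induction f generalizing q2 vis acc m with
  | nil => simp [pvRoundC]
  | cons v rest ih =>
      have hlen : (v :: rest).length + m = (rest.length + m) + 1 := by
        simp [List.length_cons]
        omega
      rw [hlen]
      simp only [List.map_cons, List.cons_append, pvA_loop, List.foldl_cons]
      by_cases hcv : g.contains v
      · rw [if_pos ⟨hh, hcv⟩, pvA_items]
        have hq : (rest.map (fun v => (v, h)) ++ q2.map (fun v => (v, h + 1)))
              ++ (pvColI ts te ((g.get? v).getD []) vis).2.map (fun nb => (nb, h + 1))
            = rest.map (fun v => (v, h)) ++ (q2 ++ (pvColI ts te ((g.get? v).getD []) vis).2).map (fun v => (v, h + 1)) := by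
          simp [List.append_assoc]
        rw [hq, ih]
        simp only [pvRoundC]
        simp [List.append_assoc]
      · rw [if_neg (by intro hand; exact hcv hand.2), ih]
        have hget : (g.get? v).getD [] = ([] : List (Int × List Int)) := by
          have hnone : g.get? v = none := by
            have hiso := PySem.Dict.contains_eq_isSome_get? (d := g) (k := v)
            cases hgv : g.get? v with
            | none => rfl
            | some w =>
                rw [hgv] at hiso
                simp [hiso] at hcv
          simp [hnone]
        simp only [pvRoundC, hget, pvColI, List.nil_append]

-- last level: hop-5 entries are only popped and recorded
lemma pvA_last (g : PySem.Dict Int (List (Int × List Int))) (ts te : Int)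
    (f : List Int) (vis acc : PySem.Set Int) (m : Nat) (h : Int) (hh : ¬ h < 5) :
    pvA_loop g ts te (f.length + m) (f.map (fun v => (v, h))) vis acc
    = f.foldl PySem.Set.add acc := by
  induction f generalizing acc m with
  | nil => cases m <;> simp [pvA_loop]
  | cons v rest ih =>
      have hlen : (v :: rest).length + m = (rest.length + m) + 1 := by
        simp [List.length_cons]
        omega
      rw [hlen]
      simp only [List.map_cons, pvA_loop, List.foldl_cons]
      rw [if_neg (by intro hand; exact hh hand.1)]
      exact ih _ _

-- running A for n more levels (hop 5 - n upward) records exactly the trace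
lemma pvA_run (g : PySem.Dict Int (List (Int × List Int))) (ts te : Int) (n : Nat) (hn : n ≤ 5) :
    ∀ (vis acc : PySem.Set Int) (f : List Int) (m : Nat),
    pvA_loop g ts te (pvPops g ts te n vis f + m) (f.map (fun v => (v, (5 - n : Int)))) vis acc
    = (pvTrace g ts te n vis f).foldl PySem.Set.add acc := by
  induction n with
  | zero =>
      intro vis acc f m
      simp only [pvPops, pvTrace, Nat.cast_zero, Int.sub_zero]
      exact pvA_last g ts te f vis acc m 5 (by omega)
  | succ n ih =>
      intro vis acc f m
      have hh : ((5 : Int) - (n + 1 : Nat)) < 5 := by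
        push_cast
        omega
      have hq : f.map (fun v => (v, ((5 : Int) - (n + 1 : Nat))))
          = f.map (fun v => (v, ((5 : Int) - (n + 1 : Nat)))) ++ ([] : List Int).map (fun v => (v, ((5 : Int) - (n + 1 : Nat)) + 1)) := by
        simp
      rw [hq]
      simp only [pvPops, Nat.add_assoc]
      rw [pvA_level g ts te f [] vis acc _ _ hh]
      have harg : (((5 : Int) - (n + 1 : Nat)) + 1) = ((5 : Int) - (n : Nat)) := by
        push_cast
        omega
      rw [harg, List.nil_append, ih (by omega)]
      simp [pvTrace, List.foldl_append]

-- bookkeeping for the iterate, the news and the trace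
lemma pvIter_fst (g : PySem.Dict Int (List (Int × List Int))) (ts te : Int) (n : Nat) :
    ∀ (vis : PySem.Set Int) (f : List Int), vis.Nodup →
    (pvIter g ts te n vis f).1 = vis ++ pvNews g ts te n vis f ∧ (pvIter g ts te n vis f).1.Nodup := by
  induction n with
  | zero =>
      intro vis f h
      simp [pvIter, pvNews, h]
  | succ n ih =>
      intro vis f h
      obtain ⟨h1, h2⟩ := pvRoundC_grow g ts te f vis h
      obtain ⟨h3, h4⟩ := ih (pvRoundC g ts te f vis).1 (pvRoundC g ts te f vis).2 h2
      refine ⟨?_, by simpa [pvIter] using h4⟩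
      simp only [pvIter, pvNews]
      rw [h3, h1, List.append_assoc]

lemma pvTrace_eq (g : PySem.Dict Int (List (Int × List Int))) (ts te : Int) (n : Nat) :
    ∀ (vis : PySem.Set Int) (f : List Int),
    pvTrace g ts te n vis f = f ++ pvNews g ts te n vis f := by
  induction n with
  | zero =>
      intro vis f
      simp [pvTrace, pvNews]
  | succ n ih =>
      intro vis f
      simp [pvTrace, pvNews, ih]

lemma pvPops_eq (g : PySem.Dict Int (List (Int × List Int))) (ts te : Int) (n : Nat) :
    ∀ (vis : PySem.Set Int) (f : List Int),
    pvPops g ts te n vis f = (pvTrace g ts te n vis f).length := by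
  induction n with
  | zero =>
      intro vis f
      simp [pvPops, pvTrace]
  | succ n ih =>
      intro vis f
      simp [pvPops, pvTrace, ih]

lemma pvNews_mem (tg : List (Int × List (Int × List Int))) (ts te : Int) (n : Nat) :
    ∀ (vis : PySem.Set Int) (f : List Int) (x : Int),
    x ∈ pvNews (PySem.Dict.mk tg) ts te n vis f → x ∈ pvAllN tg := by
  induction n with
  | zero =>
      intro vis f x hx
      simp [pvNews] at hx
  | succ n ih =>
      intro vis f x hx
      simp only [pvNews] at hx
      rcases List.mem_append.1 hx with hx | hx
      · exact pvRoundC_mem tg ts te f vis x hx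
      · exact ih _ _ _ hx

-- a frontier whose round finds nothing keeps the iterate fixed
lemma pvIter_nil (g : PySem.Dict Int (List (Int × List Int))) (ts te : Int) (n : Nat) (vis : PySem.Set Int) :
    (pvIter g ts te n vis []).1 = vis := by
  induction n generalizing vis with
  | zero => simp [pvIter]
  | succ n ih => simp [pvIter, pvRoundC, ih]

-- scanning saturated vertices is a no-op
lemma pvB_add_id (l : List Int) (r : PySem.Set Int) (h : ∀ x ∈ l, x ∈ r) :
    l.foldl PySem.Set.add r = r := by
  induction l with
  | nil => rfl
  | cons nb rest ih =>
      rw [List.foldl_cons, PySem.Set.add_of_mem (h nb (by simp))]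
      exact ih (fun x hx => h x (by simp [hx]))

lemma pvB_scan_id (adj : PySem.Dict Int (List Int)) (l : List Int) (r : PySem.Set Int)
    (h : ∀ v ∈ l, ∀ x ∈ (adj.get? v).getD [], x ∈ r) :
    l.foldl (pvB_scan adj) r = r := by
  induction l with
  | nil => rfl
  | cons v rest ih =>
      rw [List.foldl_cons]
      rw [show pvB_scan adj r v = r from pvB_add_id _ _ (h v (by simp))]
      exact ih (fun v hv => h v (by simp [hv]))

-- scanning the frontier suffix performs the canonical round
lemma pvB_scan_frontier (ts te : Int) (tg : List (Int × List (Int × List Int))) (f : List Int) (r : PySem.Set Int) :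
    f.foldl (pvB_scan (pvB_adj ts te tg)) r = (pvRoundC (PySem.Dict.mk tg) ts te f r).1 := by
  induction f generalizing r with
  | nil => simp [pvRoundC]
  | cons v rest ih =>
      rw [List.foldl_cons, pvB_scan_eq]
      simp only [pvRoundC]
      exact ih _

-- B's whole-set snapshot round, split as saturated prefix + frontier suffix
lemma pvB_round_split (ts te : Int) (tg : List (Int × List (Int × List Int))) (old f : List Int)
    (hcl : ∀ v ∈ old, ∀ x ∈ pvB_merge ts te (((PySem.Dict.mk tg).get? v).getD []), x ∈ old ++ f) :
    pvB_round (pvB_adj ts te tg) (old ++ f)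
    = (pvRoundC (PySem.Dict.mk tg) ts te f (old ++ f)).1 := by
  have hid : old.foldl (pvB_scan (pvB_adj ts te tg)) (old ++ f) = old ++ f := by
    apply pvB_scan_id
    intro v hv x hx
    rw [pvB_adj_get] at hx
    exact hcl v hv x hx
  rw [pvB_round, List.foldl_append, hid, pvB_scan_frontier]

-- B's bounded fixpoint iteration computes the canonical iterate
lemma pvB_rounds_iter (ts te : Int) (tg : List (Int × List (Int × List Int))) (n : Nat) :
    ∀ (old f : List Int), ((old ++ f : List Int)).Nodup →
    (∀ v ∈ old, ∀ x ∈ pvB_merge ts te (((PySem.Dict.mk tg).get? v).getD []), x ∈ old ++ f) →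
    pvB_rounds (pvB_adj ts te tg) n (old ++ f)
    = (pvIter (PySem.Dict.mk tg) ts te n (old ++ f) f).1 := by
  induction n with
  | zero =>
      intro old f _ _
      simp [pvB_rounds, pvIter]
  | succ n ih =>
      intro old f hnd hcl
      have hround := pvB_round_split ts te tg old f hcl
      obtain ⟨hgrow, hnd'⟩ := pvRoundC_grow (PySem.Dict.mk tg) ts te f (old ++ f) hnd
      simp only [pvB_rounds, hround]
      by_cases he : (pvRoundC (PySem.Dict.mk tg) ts te f (old ++ f)).2 = []
      · have hlen : PySem.Set.len (pvRoundC (PySem.Dict.mk tg) ts te f (old ++ f)).1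
            = PySem.Set.len (old ++ f) := by
          simp [PySem.Set.len, hgrow, he]
        rw [if_pos hlen]
        simp only [pvIter, he, pvIter_nil]
      · have hlen : ¬ PySem.Set.len (pvRoundC (PySem.Dict.mk tg) ts te f (old ++ f)).1
            = PySem.Set.len (old ++ f) := by
          simp only [PySem.Set.len, hgrow, List.length_append]
          have : 0 < (pvRoundC (PySem.Dict.mk tg) ts te f (old ++ f)).2.length :=
            List.length_pos_of_ne_nil he
          omega
        have hstep := ih (old ++ f) (pvRoundC (PySem.Dict.mk tg) ts te f (old ++ f)).2
          (by rw [← hgrow]; exact hnd')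
          (by
            intro v hv x hx
            rw [← hgrow]
            rcases List.mem_append.1 hv with hv | hv
            · exact pvRoundC_mono _ _ _ _ _ _ (hcl v hv x hx)
            · exact pvRoundC_self _ _ _ _ _ v hv x hx)
        rw [← hgrow] at hstep
        rw [if_neg hlen, hstep]
        simp only [pvIter]

-- fuel arithmetic: the port's fuel bounds every center's pop count
lemma pvAllN_length (tg : List (Int × List (Int × List Int))) :
    (pvAllN tg).length = (tg.map (fun p => (p.2.map (fun q => q.2.length)).sum)).sum := by
  simp [pvAllN, List.length_flatMap]

lemma pvNews_len_le (tg : List (Int × List (Int × List Int))) (ts te : Int) (n : Nat) (c : Int) :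
    (pvNews (PySem.Dict.mk tg) ts te n [c] [c]).length ≤ (pvAllN tg).length := by
  have hnd0 : (([c] : List Int)).Nodup := by simp
  obtain ⟨h1, h2⟩ := pvIter_fst (PySem.Dict.mk tg) ts te n [c] [c] hnd0
  rw [h1] at h2
  have hndN : (pvNews (PySem.Dict.mk tg) ts te n [c] [c]).Nodup := h2.of_append_right
  calc (pvNews (PySem.Dict.mk tg) ts te n [c] [c]).length
      = (pvNews (PySem.Dict.mk tg) ts te n [c] [c]).toFinset.card :=
        (List.toFinset_card_of_nodup hndN).symm
    _ ≤ (pvAllN tg).toFinset.card := Finset.card_le_card (fun x hx => by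
        rw [List.mem_toFinset] at hx ⊢
        exact pvNews_mem tg ts te n _ _ x hx)
    _ ≤ (pvAllN tg).length := (pvAllN tg).toFinset_card_le

-- Set.union is the foldl of add (Python's result |= reach)
lemma pvUnion_foldl (s : PySem.Set Int) (l : List Int) :
    PySem.Set.union s l = l.foldl PySem.Set.add s := by
  rfl

-- one center processed by A = union with B's reached set
lemma pvCenter (tg : List (Int × List (Int × List Int))) (ts te : Int) (c : Int) (acc : PySem.Set Int) :
    pvA_loop (PySem.Dict.mk tg) ts te ((tg.map (fun p => (p.2.map (fun q => q.2.length)).sum)).sum + 1)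
      [(c, 0)] (PySem.Set.ofList [c]) acc
    = PySem.Set.union acc (pvB_rounds (pvB_adj ts te tg) 5 (PySem.Set.ofList [c])) := by
  have hof : (PySem.Set.ofList [c] : PySem.Set Int) = ([c] : List Int) := rfl
  rw [hof]
  have hpop : pvPops (PySem.Dict.mk tg) ts te 5 [c] [c]
      ≤ (tg.map (fun p => (p.2.map (fun q => q.2.length)).sum)).sum + 1 := by
    rw [pvPops_eq, pvTrace_eq]
    have hb := pvNews_len_le tg ts te 5 c
    rw [pvAllN_length] at hb
    simp only [List.length_append, List.length_cons, List.length_nil]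
    omega
  obtain ⟨m, hm⟩ := Nat.exists_eq_add_of_le hpop
  have hrun := pvA_run (PySem.Dict.mk tg) ts te 5 (by omega) [c] acc [c] m
  have hmap : ([c].map (fun v => (v, ((5 : Int) - (5 : Nat))))) = [(c, 0)] := by norm_num
  rw [hmap] at hrun
  have hrounds := pvB_rounds_iter ts te tg 5 [] [c]
    (by simp) (by intro v hv; simp at hv)
  rw [List.nil_append] at hrounds
  rw [hm, hrun, hrounds,
    (pvIter_fst (PySem.Dict.mk tg) ts te 5 [c] [c] (by simp)).1,
    pvTrace_eq, pvUnion_foldl]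

-- ===== VERDICT (by name: the statement is the Claim_ definition above) =====
theorem optimize_neighbor_search_spec : Claim_equal_optimize_neighbor_search := by
  intro tg ts te cs _
  unfold Spec_optimize_neighbor_search optimize_neighbor_search optimize_neighbor_search_alt
  exact List.foldl_ext _ _ _ (fun acc c _ => pvCenter tg ts te c acc)
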